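-- pv_equiv track=rewrite | github.com/blueskullMRX/Code-Debugger-NLP | backend/recommendation_engine_v3.py | _identify_error_block
-- ===== SOURCE A (Python) =====
-- from typing import Dict, List, Optional
--
-- def _identify_error_block(code: str, line_number: Optional[int]) -> str:
--     """Identify the code block containing the error"""
--     if not line_number:
--         return code[:200]  # Return first 200 chars if no line number
--
--     lines = code.split('\n')
--     if line_number <= len(lines):
--         # Find the logical block (function, loop, etc.)
--         start_line = max(0, line_number - 1)
--
--         # Look backwards for block start
--         for i in range(start_line, -1, -1):
--             line = lines[i].strip()
--             if any(keyword in line for keyword in ['def ', 'class ', 'for ', 'while ', 'if ']):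
--                 start_line = i
--                 break
--
--         # Look forwards for block end
--         end_line = min(len(lines), line_number + 5)
--
--         return '\n'.join(lines[start_line:end_line])
--
--     return code
-- ===== SOURCE B (Python) =====
-- def _identify_error_block(code: str, line_number):
--     """Identify the code block containing the error"""
--     if not line_number:
--         return code[:200]
--
--     lines = code.split('\n')
--     if line_number > len(lines):
--         return code
--
--     default = max(0, line_number - 1)
--     end = min(len(lines), line_number + 5)
--     keywords = ('def ', 'class ', 'for ', 'while ', 'if ')
--
--     # single streaming pass: keep a buffer of lines, resetting it whenever a
--     # block-opening line at or before the error line is seen (and at the error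
--     # line itself if none was seen), stopping at the block end.
--     block = []
--     seen = False
--     for i, line in enumerate(lines):
--         if i >= end:
--             break
--         if i <= default and any(kw in line.strip() for kw in keywords):
--             block = []
--             seen = True
--         if i == default and not seen:
--             block = []
--         block.append(line)
--     return '\n'.join(block)
-- ===== Notes on version B (the rewrite author's own statement) =====
-- stated objective: alternative
-- what changed: A locates a block-start index by a backward scan with a break and then slices the line list; B never computes a start index or slices: it makes one forward streaming pass accumulating lines into a buffer, resetting the buffer at each block-opening line at or before the error line (and at the error line itself if none was seen) and breaking at the block end.
-- intended difference: For line_number < -5 on code with more than -(line_number+5) lines (except the degenerate corner where exactly one line stays in range and it is empty), A's block end min(len(lines), line_number+5) is negative so Python's slice wraps around and A returns an accidental nonempty prefix of the file ('a\nb' at the witness); B returns '' (no block), the intended result for a nonexistent line. — e.g. on _identify_error_block("a\nb\nc\nd\nx\ny\nz", some (-10)): A returns "a\nb", B returns ""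
import Mathlib
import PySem

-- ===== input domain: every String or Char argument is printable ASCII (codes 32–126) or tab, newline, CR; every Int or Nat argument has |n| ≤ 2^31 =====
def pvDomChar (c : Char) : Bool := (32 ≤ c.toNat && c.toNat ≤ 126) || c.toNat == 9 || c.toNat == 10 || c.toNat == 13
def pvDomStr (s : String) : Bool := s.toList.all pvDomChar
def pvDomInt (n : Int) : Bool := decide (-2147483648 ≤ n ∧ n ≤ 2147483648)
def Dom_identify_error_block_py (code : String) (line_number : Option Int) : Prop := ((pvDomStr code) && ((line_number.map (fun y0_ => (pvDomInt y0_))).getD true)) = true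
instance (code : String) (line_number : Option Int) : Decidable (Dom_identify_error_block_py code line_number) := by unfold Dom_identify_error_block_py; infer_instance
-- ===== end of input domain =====

-- B replaces A's find-start-index-then-slice by a single streaming pass that accumulates
-- lines into a buffer, resetting the buffer at block-opening lines (objective: alternative).

-- ===== PORT A =====
-- the keyword list ['def ', 'class ', 'for ', 'while ', 'if '] (identical literal in both Pythons)
def pvKeywords : List String := ["def ", "class ", "for ", "while ", "if "]

-- 'any(keyword in lines[i].strip() for keyword in KEYWORDS)' (identical test in both Pythons)
def pvHit (s : String) : Bool :=
  pvKeywords.any (fun kw => PySem.Str.isIn kw (PySem.Str.strip s))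

-- A's 'for i in range(start_line, -1, -1): … break' loop; lines[i] is always in range here
-- (0 ≤ i ≤ start_line < len(lines)), so pyGetD with an unused default is exact.
def pvScanBack (lines : List String) : List Int → Int → Int
  | [], dflt => dflt
  | i :: rest, dflt =>
    if pvHit (PySem.List.pyGetD lines i "") then i
    else pvScanBack lines rest dflt

def identify_error_block_py (code : String) (line_number : Option Int) : String :=
  match line_number with
  | none => PySem.Str.slice code none (some 200)      -- 'if not line_number'
  | some ln =>
    if ln = 0 then PySem.Str.slice code none (some 200)
    else
      let lines := (PySem.Str.split? code "\n").getD []   -- sep "\n" ≠ "": split? is always some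
      if ln ≤ (lines.length : Int) then
        let start0 : Int := max 0 (ln - 1)
        let start := pvScanBack lines (PySem.List.pyRange start0 (-1) (-1)) start0
        let endl : Int := min ((lines.length : Int)) (ln + 5)
        PySem.Str.join "\n" (PySem.List.slice lines (some start) (some endl))
      else code

-- ===== PORT B =====
-- B's 'for i, line in enumerate(lines): …' loop with its break and the two buffer resets.
def pvLoopB (dflt endl : Int) : List (Int × String) → List String → Bool → List String
  | [], block, _ => block
  | (i, line) :: rest, block, seen =>
    if endl ≤ i then block                               -- 'if i >= end: break'
    else if i ≤ dflt && pvHit line then                  -- 'block = []; seen = True' then append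
      pvLoopB dflt endl rest [line] true
    else if i == dflt && !seen then                      -- 'block = []' then append
      pvLoopB dflt endl rest [line] seen
    else
      pvLoopB dflt endl rest (block ++ [line]) seen      -- 'block.append(line)'

def identify_error_block_py_alt (code : String) (line_number : Option Int) : String :=
  match line_number with
  | none => PySem.Str.slice code none (some 200)      -- 'if not line_number'
  | some ln =>
    if ln = 0 then PySem.Str.slice code none (some 200)
    else
      let lines := (PySem.Str.split? code "\n").getD []   -- sep "\n" ≠ "": split? is always some
      if (lines.length : Int) < ln then code
      else
        let dflt : Int := max 0 (ln - 1)
        let endl : Int := min ((lines.length : Int)) (ln + 5)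
        PySem.Str.join "\n" (pvLoopB dflt endl (PySem.List.enumerate lines 0) [] false)

-- ===== PRECONDITION & SPEC =====
-- On line_number < -5 with more than -(line_number+5) lines (except the degenerate corner
-- where exactly one line stays in range and it is empty), A's block end
-- min(len(lines), line_number+5) is negative, Python's slice wraps around and A returns an
-- accidental nonempty prefix of the file; B returns '' (no block), the intended result for a
-- nonexistent line.
def D_identify_error_block_py (code : String) (line_number : Option Int) : Prop :=
  line_number.getD 0 + 5 < 0 ∧
    0 < ((((PySem.Str.split? code "\n").getD []).length : Int) + line_number.getD 0 + 5) ∧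
    (2 ≤ ((((PySem.Str.split? code "\n").getD []).length : Int) + line_number.getD 0 + 5) ∨
      ¬ ((PySem.Str.split? code "\n").getD []).headD "" = "")
instance (code : String) (line_number : Option Int) : Decidable (D_identify_error_block_py code line_number) := by unfold D_identify_error_block_py; infer_instance

def Spec_identify_error_block_py (code : String) (line_number : Option Int) (out : String) : Prop := ¬ D_identify_error_block_py code line_number → out = identify_error_block_py_alt code line_number
instance (code : String) (line_number : Option Int) (out : String) : Decidable (Spec_identify_error_block_py code line_number out) := by unfold Spec_identify_error_block_py; infer_instance

def pvDiffWitness_identify_error_block_py : String × Option Int := ("a\nb\nc\nd\nx\ny\nz", some (-10))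
def pvDiffWitnessOut_identify_error_block_py : String × String := ("a\nb", "")

-- ===== CLAIM (what is proved, stated in full; the proofs are below) =====
def Claim_unchanged_identify_error_block_py : Prop := ∀ (code : String) (line_number : Option Int), Dom_identify_error_block_py code line_number → Spec_identify_error_block_py code line_number (identify_error_block_py code line_number)
def Claim_exact_identify_error_block_py : Prop := ∀ (code : String) (line_number : Option Int), Dom_identify_error_block_py code line_number → D_identify_error_block_py code line_number → identify_error_block_py code line_number ≠ identify_error_block_py_alt code line_number
def Claim_changed_identify_error_block_py : Prop := Dom_identify_error_block_py (pvDiffWitness_identify_error_block_py.1) (pvDiffWitness_identify_error_block_py.2) ∧ D_identify_error_block_py (pvDiffWitness_identify_error_block_py.1) (pvDiffWitness_identify_error_block_py.2) ∧ identify_error_block_py (pvDiffWitness_identify_error_block_py.1) (pvDiffWitness_identify_error_block_py.2) = pvDiffWitnessOut_identify_error_block_py.1 ∧ identify_error_block_py_alt (pvDiffWitness_identify_error_block_py.1) (pvDiffWitness_identify_error_block_py.2) = pvDiffWitnessOut_identify_error_block_py.2 ∧ pvDiffWitnessOut_identify_error_block_py.1 ≠ pvDiffWitnessOut_identify_erro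r_block_py.2

-- ===== LEMMAS AND PROOFS =====

-- the predicate B's loop resets on, as a function of an enumerated entry
def pvPred (d : Int) (p : Int × String) : Bool := decide (p.1 ≤ d) && pvHit p.2

-- every entry of 'enumerate rest k' carries an index ≥ k
theorem pvEnum_ge (rest : List String) (k : Int) (p : Int × String)
    (hp : p ∈ PySem.List.enumerate rest k) : k ≤ p.1 := by
  rcases (PySem.List.mem_enumerate_iff _ _ _).1 hp with ⟨j, hj, rfl⟩
  simp

-- past the default line no entry can match the reset predicate
theorem pvFilter_enum_nil (d : Int) (rest : List String) (k : Int) (hk : d < k) :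
    (PySem.List.enumerate rest k).filter (pvPred d) = [] := by
  rw [List.filter_eq_nil_iff]
  intro p hp
  have := pvEnum_ge rest k p hp
  simp [pvPred]
  intro h; omega

theorem pvTake_cons (e k : Int) (h : k < e) (line : String) (rest : List String) :
    (line :: rest).take (e - k).toNat = line :: rest.take (e - (k + 1)).toNat := by
  have hh : (e - k).toNat = (e - (k + 1)).toNat + 1 := by omega
  rw [hh, List.take_succ_cons]

theorem pvDrop_cons (m k : Int) (h : k < m) (line : String) (rest : List String) :
    (line :: rest).drop (m - k).toNat = rest.drop (m - (k + 1)).toNat := by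
  have hh : (m - k).toNat = (m - (k + 1)).toNat + 1 := by omega
  rw [hh, List.drop_succ_cons]

-- B's loop, characterized: the buffer it returns is a drop/take segment of the lines
theorem pvLoopB_eq (d e : Int) (hde : d < e) (rest : List String) :
    ∀ (k : Int) (block : List String) (seen : Bool),
    pvLoopB d e (PySem.List.enumerate rest k) block seen =
      if e ≤ k then block
      else
        (((PySem.List.enumerate rest k).filter (pvPred d)).getLast?).elim
          (if seen = false ∧ k ≤ d ∧ d < k + rest.length then
            (rest.drop (d - k).toNat).take (e - d).toNat
          else block ++ rest.take (e - k).toNat)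
          (fun p => (rest.drop (p.1 - k).toNat).take (e - p.1).toNat) := by
  induction rest with
  | nil =>
    intro k block seen
    simp only [PySem.List.enumerate_nil, pvLoopB, List.filter_nil, List.getLast?_nil,
      List.length_nil, List.take_nil, List.append_nil, Option.elim_none]
    split_ifs with h1 h2
    · rfl
    · omega
    · rfl
  | cons line rest ih =>
    intro k block seen
    rw [PySem.List.enumerate_cons]
    by_cases he : e ≤ k
    · simp only [pvLoopB, if_pos he]
    · have hke : k < e := by omega
      rw [if_neg he]
      simp only [pvLoopB, if_neg he, List.filter_cons]
      by_cases h1 : (decide (k ≤ d) && pvHit line) = true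
      · -- reset-and-remember branch: 'block = []; seen = True'
        have hpv : pvPred d (k, line) = true := by simpa [pvPred] using h1
        rw [if_pos h1, if_pos hpv, ih]
        rcases hlast : (List.filter (pvPred d) (PySem.List.enumerate rest (k + 1))).getLast? with _ | p
        · have hnil := List.getLast?_eq_none_iff.mp hlast
          rw [hnil, List.getLast?_singleton]
          simp only [Option.elim_none, Option.elim_some]
          have hdk : ((k, line).1 - k).toNat = 0 := by simp
          rw [hdk, List.drop_zero, pvTake_cons e k hke]
          split_ifs with h2 h3
          · rw [show (e - (k + 1)).toNat = 0 from by omega, List.take_zero]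
          · exact absurd h3.1 (by simp)
          · rfl
        · have hne : List.filter (pvPred d) (PySem.List.enumerate rest (k + 1)) ≠ [] := by
            intro hn; rw [hn] at hlast; simp at hlast
          have hmem := List.mem_of_getLast? hlast
          have hp1 : k + 1 ≤ p.1 := pvEnum_ge _ _ _ (List.mem_of_mem_filter hmem)
          have hpd : p.1 ≤ d := by
            have := List.of_mem_filter hmem
            simp [pvPred] at this; exact this.1
          have hcons : ((k, line) :: List.filter (pvPred d) (PySem.List.enumerate rest (k + 1))).getLast?
              = some p := by
            rcases hF : List.filter (pvPred d) (PySem.List.enumerate rest (k + 1)) with _ | ⟨q, t⟩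
            · exact absurd hF hne
            · rw [List.getLast?_cons_cons]; rw [hF] at hlast; exact hlast
          rw [hcons, if_neg (by omega : ¬ e ≤ k + 1)]
          simp only [Option.elim_some]
          rw [pvDrop_cons p.1 k (by omega)]
      · -- no reset from a keyword on this line
        have hpv : pvPred d (k, line) = false := by
          simpa [pvPred] using h1
        have hpv' : ¬ pvPred d (k, line) = true := by simp [hpv]
        have hlen : (((line :: rest).length : Int)) = (rest.length : Int) + 1 := by simp
        rw [if_neg h1, if_neg hpv']
        by_cases h2 : (k == d && !seen) = true
        · -- 'block = []' at the error line itself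
          have hkd : k = d := by simpa using (Bool.and_eq_true_iff.mp h2).1
          have hsn : seen = false := by
            have := (Bool.and_eq_true_iff.mp h2).2; simpa using this
          rw [if_pos h2, ih, pvFilter_enum_nil d rest (k + 1) (by omega), List.getLast?_nil]
          simp only [Option.elim_none]
          rw [if_neg (show ¬ (seen = false ∧ k + 1 ≤ d ∧ d < k + 1 + (rest.length : Int)) by
              rintro ⟨-, hh, -⟩; omega),
            if_pos (show seen = false ∧ k ≤ d ∧ d < k + ((line :: rest).length : Int) from
              ⟨hsn, by omega, by omega⟩),
            show (d - k).toNat = 0 from by omega, List.drop_zero]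
          by_cases hsk : e ≤ k + 1
          · rw [if_pos hsk, show (e - d).toNat = 1 from by omega]
            simp
          · rw [if_neg hsk, pvTake_cons e d (by omega),
              show e - (d + 1) = e - (k + 1) from by omega]
            simp
        · -- plain append
          have hne_kd : seen = false → k ≠ d := by
            intro hs hkd; exact h2 (by simp [hkd, hs])
          rw [if_neg h2, ih]
          rcases hlast : (List.filter (pvPred d) (PySem.List.enumerate rest (k + 1))).getLast? with _ | p
          · simp only [Option.elim_none]
            by_cases hsk : e ≤ k + 1
            · rw [if_pos hsk,
                if_neg (show ¬ (seen = false ∧ k ≤ d ∧ d < k + ((line :: rest).length : Int)) by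
                  rintro ⟨hs, hkd', -⟩
                  exact hne_kd hs (by omega))]
              rw [show (e - k).toNat = 1 from by omega]
              simp
            · rw [if_neg hsk]
              by_cases hC : seen = false ∧ k + 1 ≤ d ∧ d < k + 1 + (rest.length : Int)
              · rw [if_pos hC,
                  if_pos (show seen = false ∧ k ≤ d ∧ d < k + ((line :: rest).length : Int) from
                    ⟨hC.1, by omega, by omega⟩)]
                rw [pvDrop_cons d k (by omega)]
              · rw [if_neg hC,
                  if_neg (show ¬ (seen = false ∧ k ≤ d ∧ d < k + ((line :: rest).length : Int)) by
                    rintro ⟨hs, hkd', hl⟩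
                    exact hC ⟨hs, by have := hne_kd hs; omega, by omega⟩)]
                rw [pvTake_cons e k hke]
                simp
          · have hne : List.filter (pvPred d) (PySem.List.enumerate rest (k + 1)) ≠ [] := by
              intro hn; rw [hn] at hlast; simp at hlast
            have hmem := List.mem_of_getLast? hlast
            have hp1 : k + 1 ≤ p.1 := pvEnum_ge _ _ _ (List.mem_of_mem_filter hmem)
            have hpd : p.1 ≤ d := by
              have := List.of_mem_filter hmem
              simp [pvPred] at this; exact this.1
            rw [if_neg (by omega : ¬ e ≤ k + 1)]
            simp only [Option.elim_some]
            rw [pvDrop_cons p.1 k (by omega)]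

-- A's break-loop over an index list returns the first hit, i.e. the head of the filtered list.
theorem pvScanBack_eq_head (lines : List String) (is : List Int) (d : Int) :
    pvScanBack lines is d
      = ((is.filter (fun i => pvHit (PySem.List.pyGetD lines i ""))).head?).getD d := by
  induction is with
  | nil => rfl
  | cons i rest ih =>
    simp only [pvScanBack, List.filter_cons]
    by_cases h : pvHit (PySem.List.pyGetD lines i "") = true
    · simp [h]
    · simp [h, ih]

-- range(d, -1, -1) is range(0, d + 1) reversed (0 ≤ d).
theorem pvRange_down (d : Int) (h : 0 ≤ d) :
    PySem.List.pyRange d (-1) (-1) = (PySem.List.pyRange 0 (d + 1)).reverse := by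
  simp only [PySem.List.pyRange]
  norm_num
  rw [if_pos (by omega), if_pos h]
  apply List.ext_getElem
  · simp
  · intro i h1 h2
    simp only [List.getElem_reverse, List.getElem_map, List.getElem_range, List.length_map,
      List.length_range]
    simp only [List.length_map, List.length_range] at h1
    omega

-- A's block start: the LAST matching index ≤ d, defaulting to d
theorem pvStart_eq (lines : List String) (d : Int) (h : 0 ≤ d) :
    pvScanBack lines (PySem.List.pyRange d (-1) (-1)) d
      = (((PySem.List.pyRange 0 (d + 1)).filter
            (fun i => pvHit (PySem.List.pyGetD lines i ""))).getLast?).getD d := by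
  rw [pvRange_down d h, pvScanBack_eq_head, List.filter_reverse, List.head?_reverse]

-- B's last matching enumerated entry is A's last matching index, paired with its line
theorem pvHits_eq (lines : List String) (d : Int) (h0 : 0 ≤ d) (hd : d + 1 ≤ (lines.length : Int)) :
    ((PySem.List.enumerate lines 0).filter (pvPred d)).getLast?
      = (((PySem.List.pyRange 0 (d + 1)).filter
            (fun i => pvHit (PySem.List.pyGetD lines i ""))).getLast?).map
          (fun j => (j, PySem.List.pyGetD lines j "")) := by
  rw [show PySem.List.enumerate lines 0 = PySem.List.enumerate lines from rfl,
    PySem.List.enumerate_eq_map_pyRange lines "", List.filter_map,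
    PySem.List.pyRange_one_append 0 (d + 1) (PySem.List.len lines) (by omega)
      (show d + 1 ≤ PySem.List.len lines from hd),
    List.filter_append,
    show (PySem.List.pyRange (d + 1) (PySem.List.len lines)).filter
        (pvPred d ∘ fun j => (j, PySem.List.pyGetD lines j "")) = [] from by
      rw [List.filter_eq_nil_iff]
      intro j hj
      have := PySem.List.mem_pyRange_one.mp hj
      simp [pvPred]
      intro hc; omega,
    List.append_nil,
    List.filter_congr (show ∀ j ∈ PySem.List.pyRange 0 (d + 1),
        (pvPred d ∘ fun j => (j, PySem.List.pyGetD lines j "")) j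
          = pvHit (PySem.List.pyGetD lines j "") from by
      intro j hj
      have := PySem.List.mem_pyRange_one.mp hj
      simp [pvPred]
      intro hc; omega),
    List.getLast?_map]

-- split('\n') always yields at least one piece
theorem pvSplitGo_ne_nil (sep : List Char) :
    ∀ (fuel : Nat) (l cur : List Char) (acc : List (List Char)),
    PySem.Chars.splitOn.go sep fuel l cur acc ≠ [] := by
  intro fuel
  induction fuel with
  | zero => intro l cur acc; simp [PySem.Chars.splitOn.go]
  | succ n ih =>
    intro l cur acc
    cases l with
    | nil => simp [PySem.Chars.splitOn.go]
    | cons c rest =>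
      rw [PySem.Chars.splitOn.go]
      split_ifs
      · exact ih _ _ _
      · exact ih _ _ _

theorem pvLines_ne_nil (code : String) : (PySem.Str.split? code "\n").getD [] ≠ [] := by
  simp [PySem.Str.split?, PySem.Chars.split?, PySem.Chars.splitOn]
  intro h
  exact pvSplitGo_ne_nil _ _ _ _ _ h

-- the loop returns its buffer unchanged when the block end is already passed
theorem pvLoopB_break (d e k : Int) (hek : e ≤ k) (xs : List String)
    (block : List String) (seen : Bool) :
    pvLoopB d e (PySem.List.enumerate xs k) block seen = block := by
  cases xs with
  | nil => rw [PySem.List.enumerate_nil]; rfl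
  | cons x xs => rw [PySem.List.enumerate_cons]; simp only [pvLoopB, if_pos hek]

-- A's backward scan from line 0 lands on 0 whether or not line 0 matches
theorem pvScan0 (lines : List String) :
    pvScanBack lines (PySem.List.pyRange 0 (-1) (-1)) 0 = 0 := by
  rw [show PySem.List.pyRange 0 (-1) (-1) = [0] from by decide]
  simp [pvScanBack]

theorem pvTake1 (l : List String) (h : 1 ≤ l.length) : l.take 1 = [l.headD ""] := by
  cases l with
  | nil => simp at h
  | cons a t => simp

theorem pvJoin1 (x : String) : PySem.Str.join "\n" [x] = x := by
  simp [PySem.Str.join, PySem.Chars.join_singleton]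

theorem pvJoin2_ne (a b : String) (r : List String) :
    PySem.Str.join "\n" (a :: b :: r) ≠ PySem.Str.join "\n" [] := by
  intro h
  have h2 := congrArg String.toList h
  rw [PySem.Str.toList_join, PySem.Str.toList_join] at h2
  simp [PySem.Chars.join_cons_cons, PySem.Chars.join_nil] at h2

-- ===== VERDICT (by name: the statement is the Claim_ definition above) =====
theorem identify_error_block_py_spec : Claim_unchanged_identify_error_block_py := by
  intro code line_number _ hnd
  unfold identify_error_block_py identify_error_block_py_alt
  cases line_number with
  | none => rfl
  | some ln =>
    unfold D_identify_error_block_py at hnd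
    simp only [Option.getD_some] at hnd
    by_cases h0 : ln = 0
    · simp [h0]
    · simp only [if_neg h0]
      have hL1 : 1 ≤ ((((PySem.Str.split? code "\n").getD []).length : Nat) : Int) := by
        have := List.length_pos_of_ne_nil (pvLines_ne_nil code)
        omega
      set lines := (PySem.Str.split? code "\n").getD [] with hl
      by_cases hle : ln ≤ (lines.length : Int)
      · rw [if_pos hle, if_neg (by omega)]
        set d : Int := max 0 (ln - 1) with hdd
        set e : Int := min ((lines.length : Int)) (ln + 5) with he
        have hd0 : 0 ≤ d := by omega
        by_cases hep : 0 < e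
        · have hdn : d + 1 ≤ (lines.length : Int) := by omega
          have hde : d < e := by omega
          rw [pvStart_eq lines d hd0, pvLoopB_eq d e hde lines 0 [] false,
            if_neg (show ¬ e ≤ 0 by omega), pvHits_eq lines d hd0 hdn]
          rcases hF : (((PySem.List.pyRange 0 (d + 1)).filter
              (fun i => pvHit (PySem.List.pyGetD lines i ""))).getLast?) with _ | m
          · simp only [Option.map_none, Option.elim_none, Option.getD_none]
            rw [if_pos (show True ∧ (0 : Int) ≤ d ∧ d < 0 + (lines.length : Int) from
              ⟨trivial, hd0, by omega⟩)]
            rw [PySem.List.slice_toNat lines hd0 (by omega),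
              show (d - 0).toNat = d.toNat from by omega,
              show (e - d).toNat = e.toNat - d.toNat from by omega]
          · have hm := PySem.List.mem_pyRange_one.mp
              (List.mem_of_mem_filter (List.mem_of_getLast? hF))
            simp only [Option.map_some, Option.elim_some, Option.getD_some]
            rw [PySem.List.slice_toNat lines (by omega) (by omega),
              show (m - 0).toNat = m.toNat from by omega,
              show (e - m).toNat = e.toNat - m.toNat from by omega]
        · -- the block end is at or before the start of the file: both sides are empty
          rw [pvLoopB_break d e 0 (by omega) lines [] false]
          by_cases hE : e = 0 ∨ (lines.length : Int) + e ≤ 0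
          · have hclamp : PySem.List.clampIdx lines.length e = 0 := by
              unfold PySem.List.clampIdx
              split_ifs <;> omega
            have hA : PySem.List.slice lines
                (some (pvScanBack lines (PySem.List.pyRange d (-1) (-1)) d)) (some e) = [] := by
              apply List.eq_nil_of_length_eq_zero
              rw [PySem.List.length_slice, hclamp]
              omega
            rw [hA]
          · -- A's slice wraps to exactly one line, which ¬D_ forces to be empty
            have hE' : ¬ e = 0 ∧ ¬ ((lines.length : Int) + e ≤ 0) := not_or.mp hE
            obtain ⟨hE1, hE2⟩ := hE'
            have hneg : ln + 5 < 0 := by omega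
            have hee : e = ln + 5 := by omega
            have ht1 : (lines.length : Int) + ln + 5 = 1 ∧ lines.headD "" = "" := by
              by_contra hc
              apply hnd
              refine ⟨hneg, by omega, ?_⟩
              by_cases h2 : 2 ≤ (lines.length : Int) + ln + 5
              · exact Or.inl h2
              · exact Or.inr (fun hh => hc ⟨by omega, hh⟩)
            rw [show d = 0 from by omega, pvScan0 lines]
            have hsl : PySem.List.slice lines (some 0) (some e)
                = lines.take (lines.length - (-(ln + 5)).toNat) := by
              rw [PySem.List.slice_zero_start,
                show e = -(((-(ln + 5)).toNat : Nat) : Int) from by omega,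
                PySem.List.slice_to_neg_natCast lines _ (by omega)]
            rw [hsl, show lines.length - (-(ln + 5)).toNat = 1 from by omega,
              pvTake1 lines (by omega), ht1.2]
            decide
      · rw [if_neg hle, if_pos (show (lines.length : Int) < ln by omega)]

theorem identify_error_block_py_changed : Claim_changed_identify_error_block_py := by
  unfold Claim_changed_identify_error_block_py; decide

theorem identify_error_block_py_tight : Claim_exact_identify_error_block_py := by
  intro code line_number _ hD
  unfold D_identify_error_block_py at hD
  cases line_number with
  | none => simp at hD
  | some ln =>
    simp only [Option.getD_some] at hD
    obtain ⟨hneg, hb, hc⟩ := hD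
    unfold identify_error_block_py identify_error_block_py_alt
    have hL1 : 1 ≤ ((((PySem.Str.split? code "\n").getD []).length : Nat) : Int) := by
      have := List.length_pos_of_ne_nil (pvLines_ne_nil code)
      omega
    set lines := (PySem.Str.split? code "\n").getD [] with hl
    simp only [if_neg (show ¬ ln = 0 by omega)]
    rw [if_pos (show ln ≤ (lines.length : Int) by omega),
      if_neg (show ¬ (lines.length : Int) < ln by omega),
      show max 0 (ln - 1) = 0 from by omega, pvScan0 lines,
      show min ((lines.length : Int)) (ln + 5) = ln + 5 from by omega,
      pvLoopB_break 0 (ln + 5) 0 (by omega) lines [] false]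
    set k : Nat := (-(ln + 5)).toNat with hk
    have hsl : PySem.List.slice lines (some 0) (some (ln + 5))
        = lines.take (lines.length - k) := by
      rw [PySem.List.slice_zero_start,
        show (ln + 5 : Int) = -((k : Nat) : Int) from by omega,
        PySem.List.slice_to_neg_natCast lines k (by omega)]
    rw [hsl]
    by_cases h2 : 2 ≤ (lines.length : Int) + ln + 5
    · have hlen2 : 2 ≤ (lines.take (lines.length - k)).length := by
        rw [List.length_take]
        omega
      rcases hT : lines.take (lines.length - k) with _ | ⟨a, _ | ⟨b, r⟩⟩
      · rw [hT] at hlen2; simp at hlen2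
      · rw [hT] at hlen2; simp at hlen2
      · exact pvJoin2_ne a b r
    · have hhd : ¬ lines.headD "" = "" := hc.resolve_left h2
      rw [show lines.length - k = 1 from by omega,
        pvTake1 lines (by omega), pvJoin1]
      intro hcontra
      exact hhd (by rw [hcontra]; decide)
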